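-- pv_equiv track=rewrite | github.com/DrKz36/emergencev8 | src/backend/features/chat/service.py | _compute_chunk_delta
-- ===== SOURCE A (Python) =====
-- from typing import Dict, Any, List, Tuple, Optional, AsyncGenerator, AsyncIterator, cast
--
-- def _compute_chunk_delta(previous_text: str, raw_chunk: Optional[str]) -> Tuple[str, str]:
--     if raw_chunk is None:
--         return previous_text, ""
--     try:
--         chunk = str(raw_chunk)
--     except Exception:
--         chunk = ""
--     if not chunk:
--         return previous_text, ""
--     if not previous_text:
--         return chunk, chunk
--     if chunk == previous_text:
--         return previous_text, ""
--     if chunk.startswith(previous_text):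
--         return chunk, chunk[len(previous_text):]
--     if previous_text.startswith(chunk):
--         return previous_text, ""
--     if previous_text.endswith(chunk):
--         return previous_text, ""
--
--     max_overlap = min(len(chunk), len(previous_text))
--     overlap = 0
--     for size in range(max_overlap, 0, -1):
--         if previous_text.endswith(chunk[:size]):
--             overlap = size
--             break
--     if overlap:
--         delta = chunk[overlap:]
--         if not delta:
--             return previous_text, ""
--         return previous_text + delta, delta
--
--     return previous_text + chunk, chunk
-- ===== SOURCE B (Python) =====
-- def _compute_chunk_delta(previous_text, raw_chunk):
--     chunk = raw_chunk if raw_chunk is not None else ""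
--     if not chunk:
--         return previous_text, ""
--     if not previous_text:
--         return chunk, chunk
--     if previous_text.startswith(chunk):
--         return previous_text, ""
--     # KMP failure function of chunk: fail[i] = length of longest proper
--     # border (prefix = suffix) of chunk[:i+1]
--     m = len(chunk)
--     fail = [0] * m
--     k = 0
--     for i in range(1, m):
--         while k and chunk[i] != chunk[k]:
--             k = fail[k - 1]
--         if chunk[i] == chunk[k]:
--             k += 1
--         fail[i] = k
--     # run the KMP automaton over previous_text; final state j is the length
--     # of the longest prefix of chunk that is a suffix of previous_text
--     j = 0
--     for ch in previous_text:
--         while j and (j == m or ch != chunk[j]):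
--             j = fail[j - 1]
--         if j < m and ch == chunk[j]:
--             j += 1
--     delta = chunk[j:]
--     if not delta:
--         return previous_text, ""
--     return previous_text + delta, delta
-- ===== Notes on version B (the rewrite author's own statement) =====
-- stated objective: faster
-- what changed: B replaces A's descending scan over all candidate overlap lengths (each tested with an endswith on a fresh slice) by the KMP failure-function automaton: it precomputes the border table of the chunk and runs the automaton over previous_text once, the final state being the longest chunk-prefix that is a suffix of previous_text; A's equality/chunk-startswith/endswith special cases fall out of that state and only the previous_text.startswith(chunk) suppression guard remains.
import Mathlib
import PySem

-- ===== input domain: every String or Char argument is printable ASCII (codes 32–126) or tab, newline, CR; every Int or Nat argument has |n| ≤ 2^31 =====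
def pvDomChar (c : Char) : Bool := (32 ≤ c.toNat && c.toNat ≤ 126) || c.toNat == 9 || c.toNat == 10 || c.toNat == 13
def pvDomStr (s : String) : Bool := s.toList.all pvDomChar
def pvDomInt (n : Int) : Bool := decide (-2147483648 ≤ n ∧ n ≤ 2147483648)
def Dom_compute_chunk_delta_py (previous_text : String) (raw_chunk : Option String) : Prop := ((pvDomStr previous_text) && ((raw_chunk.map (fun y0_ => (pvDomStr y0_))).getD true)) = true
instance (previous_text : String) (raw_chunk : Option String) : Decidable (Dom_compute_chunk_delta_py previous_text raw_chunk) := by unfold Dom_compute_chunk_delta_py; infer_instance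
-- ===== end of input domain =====

-- B replaces A's quadratic descending overlap scan by the linear KMP failure-function
-- automaton (objective: faster, O(n+m) instead of O(min(n,m)^2)).

-- ===== PORT A =====
-- A's 'for size in range(max_overlap, 0, -1): if previous_text.endswith(chunk[:size]): overlap = size; break'
def pvALoop (p c : List Char) : List Int → Int
  | [] => 0
  | size :: rest =>
      if PySem.Chars.endswith p (PySem.List.slice c none (some size)) then size
      else pvALoop p c rest

def compute_chunk_delta_py (previous_text : String) (raw_chunk : Option String) : String × String :=
  match raw_chunk with
  | none => (previous_text, "")
  | some chunk =>
    let p := previous_text.toList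
    let c := chunk.toList
    if c = [] then (previous_text, "")
    else if p = [] then (chunk, chunk)
    else if c = p then (previous_text, "")
    else if PySem.Chars.startswith c p then
      (chunk, String.ofList (PySem.List.slice c (some (p.length : Int)) none))
    else if PySem.Chars.startswith p c then (previous_text, "")
    else if PySem.Chars.endswith p c then (previous_text, "")
    else
      let max_overlap : Int := min (c.length : Int) (p.length : Int)
      let overlap := pvALoop p c (PySem.List.pyRange max_overlap 0 (-1))
      if overlap ≠ 0 then
        let delta := PySem.List.slice c (some overlap) none
        if delta = [] then (previous_text, "")
        else (String.ofList (p ++ delta), String.ofList delta)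
      else (String.ofList (p ++ c), String.ofList c)

-- ===== PORT B =====
-- Source B's two inner 'while' loops ('while k and chunk[i] != chunk[k]: k = fail[k-1]' and
-- 'while j and (j == m or ch != chunk[j]): j = fail[j-1]'), with the stopping test abstracted
-- as 'cond'.  The 'min … (j-1)' only forces termination in Lean: the fail table built below
-- always satisfies fail[j-1] ≤ j-1, so it never changes the computed value.
def pvKmpWhile (fail : List Nat) (cond : Nat → Bool) (j : Nat) : Nat :=
  if h : j ≠ 0 ∧ cond j = true then pvKmpWhile fail cond (min (fail.getD (j-1) 0) (j-1)) else j
  termination_by j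
  decreasing_by
    have h1 := h.1
    have h2 := Nat.min_le_right (fail.getD (j-1) 0) (j-1)
    omega

-- Source B's 'fail = [0]*m; k = 0; for i in range(1, m): …; fail[i] = k' (entries are written
-- left to right and never read before being written, so the table is built by appending)
def pvBuildFail (c : List Char) : List Nat :=
  ((List.range' 1 (c.length - 1)).foldl
    (fun (st : List Nat × Nat) (i : Nat) =>
      let k1 := pvKmpWhile st.1 (fun j => !(c.getD i ' ' == c.getD j ' ')) st.2
      let k2 := if c.getD i ' ' == c.getD k1 ' ' then k1 + 1 else k1
      (st.1 ++ [k2], k2))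
    ([0], 0)).1

-- Source B's 'j = 0; for ch in previous_text: …' automaton run
def pvScan (c : List Char) (fail : List Nat) (p : List Char) : Nat :=
  p.foldl (fun j ch =>
    let j1 := pvKmpWhile fail (fun jj => (jj == c.length) || !(ch == c.getD jj ' ')) j
    if j1 < c.length && ch == c.getD j1 ' ' then j1 + 1 else j1) 0

def compute_chunk_delta_py_alt (previous_text : String) (raw_chunk : Option String) : String × String :=
  let chunk := match raw_chunk with | some s => s | none => ""
  let c := chunk.toList
  let p := previous_text.toList
  if c = [] then (previous_text, "")
  else if p = [] then (chunk, chunk)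
  else if PySem.Chars.startswith p c then (previous_text, "")
  else
    let fail := pvBuildFail c
    let j := pvScan c fail p
    let delta := PySem.List.slice c (some (j : Int)) none
    if delta = [] then (previous_text, "")
    else (String.ofList (p ++ delta), String.ofList delta)

-- ===== PRECONDITION & SPEC =====
def Spec_compute_chunk_delta_py (previous_text : String) (raw_chunk : Option String) (out : String × String) : Prop := out = compute_chunk_delta_py_alt previous_text raw_chunk
instance (previous_text : String) (raw_chunk : Option String) (out : String × String) : Decidable (Spec_compute_chunk_delta_py previous_text raw_chunk out) := by unfold Spec_compute_chunk_delta_py; infer_instance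

-- ===== CLAIM (what is proved, stated in full; the proofs are below) =====
def Claim_equal_compute_chunk_delta_py : Prop := ∀ (previous_text : String) (raw_chunk : Option String), Dom_compute_chunk_delta_py previous_text raw_chunk → Spec_compute_chunk_delta_py previous_text raw_chunk (compute_chunk_delta_py previous_text raw_chunk)

-- ===== LEMMAS AND PROOFS =====

-- pvL c t = length of the longest prefix of c that is a suffix of t (the overlap both programs compute)
def pvL (c t : List Char) : Nat := Nat.findGreatest (fun k => c.take k <:+ t) c.length

-- pvBorder c j = length of the longest proper border of c.take j (the KMP failure value)
def pvBorder (c : List Char) (j : Nat) : Nat := Nat.findGreatest (fun k => c.take k <:+ c.take j) (j-1)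

theorem pvL_spec (c t : List Char) : c.take (pvL c t) <:+ t := by
  have h : (fun k => c.take k <:+ t) 0 := by simp
  simpa [pvL] using Nat.findGreatest_spec (P := fun k => c.take k <:+ t) (Nat.zero_le c.length) h

theorem pvL_le (c t : List Char) : pvL c t ≤ c.length := Nat.findGreatest_le _

theorem le_pvL (c t : List Char) {k : Nat} (h1 : k ≤ c.length) (h2 : c.take k <:+ t) : k ≤ pvL c t :=
  Nat.le_findGreatest h1 h2

theorem pvBorder_spec (c : List Char) (j : Nat) : c.take (pvBorder c j) <:+ c.take j := by
  have h : (fun k => c.take k <:+ c.take j) 0 := by simp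
  simpa [pvBorder] using Nat.findGreatest_spec (P := fun k => c.take k <:+ c.take j) (Nat.zero_le (j-1)) h

theorem pvBorder_le (c : List Char) (j : Nat) : pvBorder c j ≤ j - 1 := Nat.findGreatest_le _

theorem le_pvBorder (c : List Char) (j : Nat) {k : Nat} (h1 : k ≤ j - 1) (h2 : c.take k <:+ c.take j) : k ≤ pvBorder c j :=
  Nat.le_findGreatest h1 h2

-- a shorter suffix of the same list is a suffix of a longer one
theorem suffix_of_suffix_le (s1 s2 t : List Char) (h1 : s1 <:+ t) (h2 : s2 <:+ t)
    (h : s1.length ≤ s2.length) : s1 <:+ s2 :=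
  List.suffix_of_suffix_length_le h1 h2 h

theorem take_succ_getD (c : List Char) (k : Nat) (h : k < c.length) :
    c.take (k+1) = c.take k ++ [c.getD k ' '] := by
  rw [List.take_add_one, List.getD_eq_getElem c ' ' h, List.getElem?_eq_getElem h]
  rfl

theorem snoc_suffix_iff (s t : List Char) (x a : Char) :
    (s ++ [x]) <:+ (t ++ [a]) ↔ x = a ∧ s <:+ t := by
  simp [← List.reverse_prefix, List.reverse_append, List.cons_prefix_cons]

-- (S2) extend an overlap by one matching character
theorem overlap_extend (c t : List Char) (a : Char) (k : Nat) (hk : k < c.length)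
    (hs : c.take k <:+ t) (ha : c.getD k ' ' = a) : c.take (k+1) <:+ (t ++ [a]) := by
  rw [take_succ_getD c k hk, ha, snoc_suffix_iff]
  exact ⟨rfl, hs⟩

-- (S1) peel the last character off an overlap
theorem overlap_unextend (c t : List Char) (a : Char) (k : Nat) (hk : k < c.length)
    (hs : c.take (k+1) <:+ (t ++ [a])) : c.take k <:+ t ∧ c.getD k ' ' = a := by
  rw [take_succ_getD c k hk, snoc_suffix_iff] at hs
  exact ⟨hs.2, hs.1⟩

-- the while loop only moves down along overlaps of t (soundness)
theorem pvKmpWhile_sound (fail : List Nat) (cond : Nat → Bool) (c t : List Char) (j : Nat)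
    (hj : j ≤ c.length) (hs : c.take j <:+ t)
    (hfail : ∀ v, 1 ≤ v → v ≤ j → fail.getD (v-1) 0 = pvBorder c v) :
    pvKmpWhile fail cond j ≤ j ∧ c.take (pvKmpWhile fail cond j) <:+ t ∧
      (pvKmpWhile fail cond j = 0 ∨ cond (pvKmpWhile fail cond j) = false) := by
  revert hj hs hfail
  induction j using Nat.strong_induction_on with
  | _ j ih =>
    intro hj hs hfail
    rw [pvKmpWhile]
    split
    · next h =>
      have hj1 : 1 ≤ j := Nat.one_le_iff_ne_zero.mpr h.1
      have hb := pvBorder_le c j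
      have hfj : fail.getD (j-1) 0 = pvBorder c j := hfail j hj1 le_rfl
      have hmin : min (fail.getD (j-1) 0) (j-1) = pvBorder c j := by rw [hfj]; omega
      rw [hmin]
      have hlt : pvBorder c j < j := by omega
      have hs' : c.take (pvBorder c j) <:+ t := (pvBorder_spec c j).trans hs
      have hres := ih (pvBorder c j) hlt (by omega) hs' (fun v h1 h2 => hfail v h1 (by omega))
      exact ⟨hres.1.trans (le_of_lt hlt), hres.2.1, hres.2.2⟩
    · next h =>
      refine ⟨le_rfl, hs, ?_⟩
      by_cases hz : j = 0
      · exact Or.inl hz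
      · right
        cases hcj : cond j
        · rfl
        · exact absurd ⟨hz, hcj⟩ h

-- the while loop never drops below any realisable overlap of t ++ [a] (completeness)
theorem pvKmpWhile_complete (fail : List Nat) (cond : Nat → Bool) (c t : List Char) (j K : Nat)
    (hj : j ≤ c.length) (hs : c.take j <:+ t)
    (hfail : ∀ v, 1 ≤ v → v ≤ j → fail.getD (v-1) 0 = pvBorder c v)
    (hKs : c.take (K-1) <:+ t)
    (hcond : cond (K-1) = false) (hKj : K - 1 ≤ j) :
    K - 1 ≤ pvKmpWhile fail cond j := by
  revert hj hs hfail hKj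
  induction j using Nat.strong_induction_on with
  | _ j ih =>
    intro hj hs hfail hKj
    rw [pvKmpWhile]
    split
    · next h =>
      have hj1 : 1 ≤ j := Nat.one_le_iff_ne_zero.mpr h.1
      have hb := pvBorder_le c j
      have hfj : fail.getD (j-1) 0 = pvBorder c j := hfail j hj1 le_rfl
      have hmin : min (fail.getD (j-1) 0) (j-1) = pvBorder c j := by rw [hfj]; omega
      rw [hmin]
      have hKlt : K - 1 < j := by
        rcases Nat.lt_or_ge (K-1) j with h' | h'
        · exact h'
        · exfalso
          have hKj' : K - 1 = j := le_antisymm hKj h'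
          have h2 := h.2
          rw [← hKj', hcond] at h2
          exact Bool.noConfusion h2
      have hlt : pvBorder c j < j := by omega
      have hKb : K - 1 ≤ pvBorder c j := by
        apply le_pvBorder c j (by omega)
        apply suffix_of_suffix_le _ _ t hKs hs
        simp [List.length_take]
        omega
      exact ih (pvBorder c j) hlt (by omega) ((pvBorder_spec c j).trans hs)
        (fun v h1 h2 => hfail v h1 (by omega)) hKb
    · next _ => exact hKj

-- one automaton step (the while loop followed by the conditional increment) moves the
-- longest overlap of t to the longest overlap of t ++ [a]
theorem kmp_step (c t : List Char) (a : Char) (fail : List Nat) (cond : Nat → Bool) (b j : Nat)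
    (hb : b ≤ c.length) (hj : j ≤ c.length) (hs : c.take j <:+ t)
    (hfail : ∀ v, 1 ≤ v → v ≤ j → fail.getD (v-1) 0 = pvBorder c v)
    (hmax : ∀ k, k ≤ b - 1 → c.take k <:+ t → k ≤ j)
    (hc1 : ∀ v, v ≤ j → cond v = false → v < b ∧ c.getD v ' ' = a)
    (hc2 : ∀ v, v < b → c.getD v ' ' = a → cond v = false) :
    ((c.getD (pvKmpWhile fail cond j) ' ' = a ∧ pvKmpWhile fail cond j < b) →
        pvKmpWhile fail cond j + 1 = Nat.findGreatest (fun k => c.take k <:+ t ++ [a]) b) ∧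
    (¬(c.getD (pvKmpWhile fail cond j) ' ' = a ∧ pvKmpWhile fail cond j < b) →
        pvKmpWhile fail cond j = 0 ∧ Nat.findGreatest (fun k => c.take k <:+ t ++ [a]) b = 0) := by
  obtain ⟨hr_le, hr_suf, hr_alt⟩ := pvKmpWhile_sound fail cond c t j hj hs hfail
  set r := pvKmpWhile fail cond j with hr
  set N := Nat.findGreatest (fun k => c.take k <:+ t ++ [a]) b with hN
  have hN_le : N ≤ b := Nat.findGreatest_le b
  have hN_spec : c.take N <:+ t ++ [a] := by
    have h0 : (fun k => c.take k <:+ t ++ [a]) 0 := by simp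
    simpa [hN] using Nat.findGreatest_spec (P := fun k => c.take k <:+ t ++ [a]) (Nat.zero_le b) h0
  have key : 1 ≤ N → N - 1 ≤ r := by
    intro hN1
    have hNlen : N - 1 < c.length := by omega
    have hNtake : c.take ((N-1)+1) <:+ t ++ [a] := by
      have : (N-1)+1 = N := by omega
      rw [this]; exact hN_spec
    obtain ⟨hu1, hu2⟩ := overlap_unextend c t a (N-1) hNlen hNtake
    have hcf : cond (N-1) = false := hc2 (N-1) (by omega) hu2
    have hKj : N - 1 ≤ j := hmax (N-1) (by omega) hu1
    exact pvKmpWhile_complete fail cond c t j N hj hs hfail hu1 hcf hKj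
  constructor
  · rintro ⟨heq, hrb⟩
    apply le_antisymm
    · exact Nat.le_findGreatest (by omega) (overlap_extend c t a r (by omega) hr_suf heq)
    · by_cases h0 : N = 0
      · omega
      · have := key (by omega); omega
  · intro hnc
    have hr0 : r = 0 := by
      rcases hr_alt with h0 | hcf
      · exact h0
      · exact absurd (And.intro (hc1 r hr_le hcf).2 (hc1 r hr_le hcf).1) hnc
    refine ⟨hr0, ?_⟩
    by_contra hN0
    have hN1 : 1 ≤ N := by omega
    have := key hN1
    have hNeq : N = 1 := by omega
    have hlen0 : 0 < c.length := by omega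
    have h1 : c.take (0+1) <:+ t ++ [a] := by
      have : (0:Nat)+1 = N := by omega
      rw [this]; exact hN_spec
    obtain ⟨_, hu2⟩ := overlap_unextend c t a 0 hlen0 h1
    exact hnc ⟨hr0 ▸ hu2, by omega⟩

theorem pvL_nil (c : List Char) (hc : c ≠ []) : pvL c [] = 0 := by
  have hs := pvL_spec c []
  have := List.suffix_nil.mp hs
  rcases List.take_eq_nil_iff.mp this with h | h
  · exact h
  · exact absurd h hc

theorem getD_map_range (f : Nat → Nat) (m v : Nat) (h : v < m) :
    ((List.range m).map f).getD v 0 = f v := by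
  simp [List.getD_eq_getElem?_getD, List.getElem?_map, List.getElem?_range h]

-- invariant of the failure-table construction fold: after processing i = 1 … n the state is
-- the border table of c.take (n+1) together with the last border value
theorem pvBuildFail_inv (c : List Char) (n : Nat) (hn : n + 1 ≤ c.length) :
    (List.range' 1 n).foldl
      (fun (st : List Nat × Nat) (i : Nat) =>
        let k1 := pvKmpWhile st.1 (fun j => !(c.getD i ' ' == c.getD j ' ')) st.2
        let k2 := if c.getD i ' ' == c.getD k1 ' ' then k1 + 1 else k1
        (st.1 ++ [k2], k2))
      ([0], 0)
    = ((List.range (n+1)).map (fun v => pvBorder c (v+1)), pvBorder c (n+1)) := by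
  induction n with
  | zero =>
    have hB1 : pvBorder c 1 = 0 := Nat.findGreatest_zero
    simp [List.range', List.range_one, hB1]
  | succ n ihn =>
    have hn' : n + 1 ≤ c.length := by omega
    rw [show List.range' 1 (n+1) = List.range' 1 n ++ [1+n] from by
      simpa using List.range'_concat (step:=1) (s:=1) (n:=n)]
    rw [List.foldl_append, ihn hn']
    simp only [List.foldl_cons, List.foldl_nil]
    have h1n : 1 + n = n + 1 := Nat.add_comm 1 n
    rw [h1n]
    have hjle : pvBorder c (n+1) ≤ n := by have := pvBorder_le c (n+1); omega
    set a := c.getD (n+1) ' ' with ha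
    have hF : ∀ v, 1 ≤ v → v ≤ pvBorder c (n+1) →
        ((List.range (n+1)).map (fun v => pvBorder c (v+1))).getD (v-1) 0 = pvBorder c v := by
      intro v h1 h2
      rw [getD_map_range _ _ _ (by omega)]
      congr 1
      omega
    have hc1 : ∀ v, v ≤ pvBorder c (n+1) → (!(c.getD (n+1) ' ' == c.getD v ' ')) = false →
        v < n+1 ∧ c.getD v ' ' = a := by
      intro v hv hcf
      simp only [Bool.not_eq_false', beq_iff_eq] at hcf
      exact ⟨by omega, hcf.symm⟩
    have hc2 : ∀ v, v < n+1 → c.getD v ' ' = a →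
        (!(c.getD (n+1) ' ' == c.getD v ' ')) = false := by
      intro v _ hva
      simp only [Bool.not_eq_false', beq_iff_eq]
      exact hva.symm
    have hstep := kmp_step c (c.take (n+1)) a ((List.range (n+1)).map (fun v => pvBorder c (v+1)))
      (fun j => !(c.getD (n+1) ' ' == c.getD j ' ')) (n+1) (pvBorder c (n+1))
      (by omega) (by omega) (pvBorder_spec c (n+1)) hF
      (fun k hk hsuf => le_pvBorder c (n+1) (by omega) hsuf) hc1 hc2
    set r := pvKmpWhile ((List.range (n+1)).map (fun v => pvBorder c (v+1)))
      (fun j => !(c.getD (n+1) ' ' == c.getD j ' ')) (pvBorder c (n+1)) with hrdef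
    have hrle : r ≤ pvBorder c (n+1) :=
      (pvKmpWhile_sound _ _ c (c.take (n+1)) _ (by omega) (pvBorder_spec c (n+1)) hF).1
    have hNB : Nat.findGreatest (fun k => c.take k <:+ c.take (n+1) ++ [a]) (n+1) = pvBorder c (n+2) := by
      have htsnoc : c.take (n+1) ++ [a] = c.take (n+2) := (take_succ_getD c (n+1) (by omega)).symm
      simp only [htsnoc]
      rfl
    have hk2 : (if c.getD (n+1) ' ' == c.getD r ' ' then r + 1 else r) = pvBorder c (n+2) := by
      split_ifs with hif
      · simp only [beq_iff_eq] at hif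
        rw [hstep.1 ⟨hif.symm, by omega⟩, hNB]
      · have hnc : ¬(c.getD r ' ' = a ∧ r < n+1) := by
          intro hx
          simp only [beq_iff_eq] at hif
          exact hif hx.1.symm
        have h2 := hstep.2 hnc
        rw [h2.1, ← hNB, h2.2]
    rw [hk2]
    rw [show List.range (n+1+1) = List.range (n+1) ++ [n+1] from List.range_succ]
    simp

-- the fail table built by pvBuildFail is the border table
theorem pvBuildFail_spec (c : List Char) (hc : c ≠ []) :
    ∀ v, 1 ≤ v → v ≤ c.length → (pvBuildFail c).getD (v-1) 0 = pvBorder c v := by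
  intro v h1 h2
  obtain ⟨n, hn⟩ : ∃ n, c.length = n + 1 := by
    cases hl : c.length with
    | zero => exact absurd (List.length_eq_zero_iff.mp hl) hc
    | succ n => exact ⟨n, rfl⟩
  unfold pvBuildFail
  rw [hn]
  simp only [Nat.add_sub_cancel]
  rw [pvBuildFail_inv c n (by omega)]
  simp only
  rw [getD_map_range _ _ _ (by omega)]
  congr 1
  omega

-- the automaton run computes the longest overlap
theorem pvScan_spec (c : List Char) (fail : List Nat) (p : List Char) (hc : c ≠ [])
    (hfail : ∀ v, 1 ≤ v → v ≤ c.length → fail.getD (v-1) 0 = pvBorder c v) :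
    pvScan c fail p = pvL c p := by
  induction p using List.reverseRecOn with
  | nil => simp [pvScan, pvL_nil c hc]
  | append_singleton t a ih =>
    unfold pvScan at ih ⊢
    rw [List.foldl_append, ih]
    simp only [List.foldl_cons, List.foldl_nil]
    have hjlen := pvL_le c t
    have hc1 : ∀ v, v ≤ pvL c t → ((v == c.length) || !(a == c.getD v ' ')) = false →
        v < c.length ∧ c.getD v ' ' = a := by
      intro v hv hcf
      simp only [Bool.or_eq_false_iff, beq_eq_false_iff_ne, Bool.not_eq_false', beq_iff_eq] at hcf
      exact ⟨Nat.lt_of_le_of_ne (hv.trans hjlen) hcf.1, hcf.2.symm⟩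
    have hc2 : ∀ v, v < c.length → c.getD v ' ' = a →
        ((v == c.length) || !(a == c.getD v ' ')) = false := by
      intro v hv hva
      simp only [Bool.or_eq_false_iff, beq_eq_false_iff_ne, Bool.not_eq_false', beq_iff_eq]
      exact ⟨by omega, hva.symm⟩
    have hstep := kmp_step c t a fail (fun jj => (jj == c.length) || !(a == c.getD jj ' '))
      c.length (pvL c t) le_rfl hjlen (pvL_spec c t)
      (fun v h1 h2 => hfail v h1 (h2.trans hjlen))
      (fun k hk hsuf => le_pvL c t (by omega) hsuf) hc1 hc2
    set r := pvKmpWhile fail (fun jj => (jj == c.length) || !(a == c.getD jj ' ')) (pvL c t) with hrdef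
    show (if r < c.length && a == c.getD r ' ' then r + 1 else r) = pvL c (t ++ [a])
    split_ifs with hif
    · simp only [Bool.and_eq_true, decide_eq_true_eq, beq_iff_eq] at hif
      exact hstep.1 ⟨hif.2.symm, hif.1⟩
    · have hnc : ¬(c.getD r ' ' = a ∧ r < c.length) := by
        intro hx
        exact hif (by rw [hx.1]; simp [hx.2])
      have h2 := hstep.2 hnc
      rw [h2.1]
      exact h2.2.symm

-- A's descending scan computes the longest overlap as well
theorem pvALoop_eq (c p : List Char) (a : Nat)
    (h1 : pvL c p ≤ a) (h2 : a ≤ min c.length p.length) :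
    pvALoop p c (PySem.List.pyRange (a : Int) 0 (-1)) = ((pvL c p : Nat) : Int) := by
  induction a with
  | zero =>
      rw [PySem.List.pyRange_neg_one_eq_nil (by omega)]
      simp [pvALoop]
      omega
  | succ n ih =>
      rw [PySem.List.pyRange_neg_one_cons (by omega)]
      simp only [pvALoop]
      have hcast : ((n+1 : Nat) : Int) = (n : Int) + 1 := by push_cast; ring
      rw [hcast]
      have hstep : (n : Int) + 1 - 1 = (n : Int) := by ring
      rw [hstep]
      rcases Nat.lt_or_ge n (pvL c p) with hlt | hge
      · have hk : pvL c p = n + 1 := by omega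
        have htake : PySem.List.slice c none (some ((n:Int) + 1)) = c.take (pvL c p) := by
          rw [show ((n : Int) + 1) = (((n+1 : Nat)) : Int) from by push_cast; ring,
            PySem.List.slice_to_natCast, ← hk]
        rw [htake]
        have hend : PySem.Chars.endswith p (c.take (pvL c p)) = true :=
          (PySem.Chars.endswith_iff _ _).mpr (pvL_spec c p)
        rw [if_pos hend]
        simp [hk]
      · have hfail : PySem.Chars.endswith p (PySem.List.slice c none (some ((n:Int) + 1))) = false := by
          by_contra hne
          have htrue : PySem.Chars.endswith p (PySem.List.slice c none (some ((n:Int) + 1))) = true := by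
            cases hx : PySem.Chars.endswith p (PySem.List.slice c none (some ((n:Int) + 1))) <;> simp_all
          rw [show ((n : Int) + 1) = (((n+1 : Nat)) : Int) from by push_cast; ring,
            PySem.List.slice_to_natCast] at htrue
          have hsuf : c.take (n+1) <:+ p := (PySem.Chars.endswith_iff _ _).mp htrue
          have := le_pvL c p (by omega) hsuf
          omega
        rw [if_neg (by simp [hfail])]
        exact ih (by omega) (by omega)

theorem main_eq (previous_text chunk : String) :
    compute_chunk_delta_py previous_text (some chunk) = compute_chunk_delta_py_alt previous_text (some chunk) := by
  simp only [compute_chunk_delta_py, compute_chunk_delta_py_alt]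
  set p := previous_text.toList with hp
  set c := chunk.toList with hc
  by_cases hce : c = []
  · simp [hce]
  by_cases hpe : p = []
  · simp [hce, hpe]
  simp only [if_neg hce, if_neg hpe]
  have hscan : pvScan c (pvBuildFail c) p = pvL c p :=
    pvScan_spec c (pvBuildFail c) p hce (pvBuildFail_spec c hce)
  have hLlep : pvL c p ≤ p.length := by
    have h1 := (pvL_spec c p).length_le
    have h2 := pvL_le c p
    simp [List.length_take] at h1
    omega
  by_cases hpc : PySem.Chars.startswith p c = true
  · -- c <+: p : B returns (previous_text, ""); so does A via one of its first branches
    have hcp' : c <+: p := (PySem.Chars.startswith_iff _ _).mp hpc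
    by_cases heq : c = p
    · rw [if_pos heq, if_pos hpc]
    · rw [if_neg heq]
      have hncp : ¬ PySem.Chars.startswith c p = true := by
        intro h
        exact heq (hcp'.eq_of_length (le_antisymm hcp'.length_le
          ((PySem.Chars.startswith_iff _ _).mp h).length_le))
      rw [if_neg hncp, if_pos hpc, if_pos hpc]
  · have hneq : c ≠ p := fun h => hpc ((PySem.Chars.startswith_iff _ _).mpr (h ▸ List.prefix_refl c))
    rw [if_neg hneq, if_neg hpc, if_neg hpc]
    rw [hscan]
    by_cases hcsp : PySem.Chars.startswith c p = true
    · -- p <+: c : A's 'chunk.startswith(previous_text)' branch; B's overlap is all of p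
      have hppc : p <+: c := (PySem.Chars.startswith_iff _ _).mp hcsp
      rw [if_pos hcsp]
      have hL : pvL c p = p.length := by
        apply le_antisymm hLlep
        exact le_pvL c p hppc.length_le
          (by rw [← List.prefix_iff_eq_take.mp hppc])
      have hlen : p.length < c.length := by
        rcases Nat.lt_or_ge p.length c.length with h | h
        · exact h
        · exact absurd (hppc.eq_of_length (le_antisymm hppc.length_le h)).symm hneq
      rw [hL, PySem.List.slice_from_natCast c p.length]
      have hdne : ¬ c.drop p.length = [] := by
        intro h
        have := congrArg List.length h
        simp at this
        omega
      rw [if_neg hdne]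
      have hpc2 : p ++ c.drop p.length = c := by
        conv_rhs => rw [← List.take_append_drop p.length c]
        rw [← List.prefix_iff_eq_take.mp hppc]
      rw [hpc2, hc, String.ofList_toList]
    · rw [if_neg hcsp]
      by_cases hend : PySem.Chars.endswith p c = true
      · -- c <:+ p : B's overlap is all of c, its delta is empty
        have hcsuf : c <:+ p := (PySem.Chars.endswith_iff _ _).mp hend
        rw [if_pos hend]
        have hL : pvL c p = c.length := by
          apply le_antisymm (pvL_le c p)
          exact le_pvL c p le_rfl (by simpa using hcsuf)
        rw [hL, PySem.List.slice_from_natCast c c.length]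
        simp
      · rw [if_neg hend]
        have hklec := pvL_le c p
        have hmin : min (c.length : Int) (p.length : Int) = ((min c.length p.length : Nat) : Int) := by
          push_cast
          rfl
        have hloop := pvALoop_eq c p (min c.length p.length) (by omega) (le_refl _)
        rw [hmin, hloop]
        by_cases hk0 : pvL c p = 0
        · rw [hk0]
          simp only [Nat.cast_zero, ne_eq, not_true_eq_false, if_false]
          rw [PySem.List.slice_from (xs := c) (a := 0) le_rfl]
          simp only [Int.toNat_zero, List.drop_zero]
          rw [if_neg hce]
        · have hne : ((pvL c p : Nat) : Int) ≠ 0 := by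
            exact_mod_cast hk0
          rw [if_pos hne, PySem.List.slice_from_natCast c (pvL c p)]

-- ===== VERDICT (by name: the statement is the Claim_ definition above) =====
theorem compute_chunk_delta_py_spec : Claim_equal_compute_chunk_delta_py := by
  intro previous_text raw_chunk _
  unfold Spec_compute_chunk_delta_py
  cases raw_chunk with
  | none => simp [compute_chunk_delta_py, compute_chunk_delta_py_alt]
  | some chunk => exact main_eq previous_text chunk
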